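-- pv_equiv track=rewrite | github.com/gessT/TradeDog | mgc_trading/execution_engine.py | validate_backtest_parity
-- ===== SOURCE A (Python) =====
-- def validate_backtest_parity(
--
--     direction: str,
--     bar_time: str,
--     backtest_signals: list[dict],
-- ) -> tuple[bool, str]:
--     """Cross-check signal against recent backtest data.
--
--     Args:
--         direction: "CALL" or "PUT"
--         bar_time: Signal bar timestamp
--         backtest_signals: List of recent signals from backtest scan
--
--     Returns:
--         (is_valid, reason) tuple
--     """
--     if not backtest_signals:
--         return True, "no_backtest_data_skip_validation"
--
--     # Look for matching signal in backtest results
--     for bt_sig in backtest_signals: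
--         bt_dir = bt_sig.get("direction", "")
--         bt_bar = bt_sig.get("bar_time", "")
--         # Match direction and bar time (within same bar window)
--         if bt_dir == direction and bt_bar == bar_time:
--             return True, "match_backtest"
--
--     # Check if any backtest signal exists near this time
--     # Allow ±1 bar tolerance for timing differences
--     for bt_sig in backtest_signals:
--         bt_dir = bt_sig.get("direction", "")
--         if bt_dir == direction:
--             return True, "match_backtest_direction"
--
--     return False, "signal_not_in_backtest"
-- ===== SOURCE B (Python) =====
-- def validate_backtest_parity(
--     direction: str,
--     bar_time: str,
--     backtest_signals: list[dict],
-- ) -> tuple[bool, str]: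
--     """Single-pass variant: one scan that short-circuits on an exact match
--     and remembers whether any direction-only match was seen."""
--     if not backtest_signals:
--         return True, "no_backtest_data_skip_validation"
--     seen_direction = False
--     for bt_sig in backtest_signals:
--         if bt_sig.get("direction", "") == direction:
--             if bt_sig.get("bar_time", "") == bar_time:
--                 return True, "match_backtest"
--             seen_direction = True
--     if seen_direction:
--         return True, "match_backtest_direction"
--     return False, "signal_not_in_backtest"
-- ===== Notes on version B (the rewrite author's own statement) =====
-- stated objective: simpler
-- what changed: Replaces A's two sequential scans of backtest_signals with one fused pass that returns immediately on an exact match and carries a seen_direction flag for the fallback result.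
import Mathlib
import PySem

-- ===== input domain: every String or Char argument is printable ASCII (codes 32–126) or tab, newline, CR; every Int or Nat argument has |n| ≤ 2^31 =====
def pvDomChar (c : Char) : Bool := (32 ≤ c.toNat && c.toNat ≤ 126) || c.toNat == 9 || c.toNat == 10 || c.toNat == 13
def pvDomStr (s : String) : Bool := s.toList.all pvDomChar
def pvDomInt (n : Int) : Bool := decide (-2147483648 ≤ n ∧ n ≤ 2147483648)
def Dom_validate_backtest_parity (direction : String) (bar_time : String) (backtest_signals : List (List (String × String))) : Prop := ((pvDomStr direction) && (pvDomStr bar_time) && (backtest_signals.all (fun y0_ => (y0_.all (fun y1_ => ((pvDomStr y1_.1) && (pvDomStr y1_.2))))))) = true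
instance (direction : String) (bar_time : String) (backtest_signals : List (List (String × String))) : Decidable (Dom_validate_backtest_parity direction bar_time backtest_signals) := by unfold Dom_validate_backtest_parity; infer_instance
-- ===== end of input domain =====

-- B fuses A's two sequential scans into one pass with a seen_direction flag (same results; objective: simpler).


-- ===== PORT A =====
-- first loop of A: exact direction+bar_time match, early return
def pvLoopExact (direction bar_time : String) : List (List (String × String)) → Option (Bool × String)
  | [] => none
  | s :: rest =>
    if PySem.Dict.getD (PySem.Dict.mk s) "direction" "" == direction && PySem.Dict.getD (PySem.Dict.mk s) "bar_time" "" == bar_time then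
      some (true, "match_backtest")
    else pvLoopExact direction bar_time rest

-- second loop of A: direction-only match, early return
def pvLoopDir (direction : String) : List (List (String × String)) → Option (Bool × String)
  | [] => none
  | s :: rest =>
    if PySem.Dict.getD (PySem.Dict.mk s) "direction" "" == direction then
      some (true, "match_backtest_direction")
    else pvLoopDir direction rest

def validate_backtest_parity (direction : String) (bar_time : String) (backtest_signals : List (List (String × String))) : Bool × String :=
  if backtest_signals = [] then (true, "no_backtest_data_skip_validation")
  else
    match pvLoopExact direction bar_time backtest_signals with
    | some r => r
    | none =>
      match pvLoopDir direction backtest_signals with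
      | some r => r
      | none => (false, "signal_not_in_backtest")

-- ===== PORT B =====
-- single pass with seen_direction accumulator
def pvAltLoop (direction bar_time : String) (seen : Bool) : List (List (String × String)) → Bool × String
  | [] => if seen then (true, "match_backtest_direction") else (false, "signal_not_in_backtest")
  | s :: rest =>
    if PySem.Dict.getD (PySem.Dict.mk s) "direction" "" == direction then
      if PySem.Dict.getD (PySem.Dict.mk s) "bar_time" "" == bar_time then (true, "match_backtest")
      else pvAltLoop direction bar_time true rest
    else pvAltLoop direction bar_time seen rest

def validate_backtest_parity_alt (direction : String) (bar_time : String) (backtest_signals : List (List (String × String))) : Bool × String :=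
  if backtest_signals = [] then (true, "no_backtest_data_skip_validation")
  else pvAltLoop direction bar_time false backtest_signals

-- ===== PRECONDITION & SPEC =====
def Spec_validate_backtest_parity (direction : String) (bar_time : String) (backtest_signals : List (List (String × String))) (out : Bool × String) : Prop := out = validate_backtest_parity_alt direction bar_time backtest_signals
instance (direction : String) (bar_time : String) (backtest_signals : List (List (String × String))) (out : Bool × String) : Decidable (Spec_validate_backtest_parity direction bar_time backtest_signals out) := by unfold Spec_validate_backtest_parity; infer_instance

-- ===== CLAIM (what is proved, stated in full; the proofs are below) =====
def Claim_equal_validate_backtest_parity : Prop := ∀ (direction : String) (bar_time : String) (backtest_signals : List (List (String × String))), Dom_validate_backtest_parity direction bar_time backtest_signals → Spec_validate_backtest_parity direction bar_time backtest_signals (validate_backtest_parity direction bar_time backtest_signals)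

-- ===== LEMMAS AND PROOFS =====
-- invariant of B's fused loop: it equals A's exact scan, falling back to the
-- direction scan pre-seeded by the accumulated flag
theorem pvAltLoop_eq (direction bar_time : String) (l : List (List (String × String))) :
    ∀ seen : Bool, pvAltLoop direction bar_time seen l =
      match pvLoopExact direction bar_time l with
      | some r => r
      | none =>
        match (if seen then some (true, "match_backtest_direction") else pvLoopDir direction l) with
        | some r => r
        | none => (false, "signal_not_in_backtest") := by
  induction l with
  | nil => intro seen; cases seen <;> simp [pvAltLoop, pvLoopExact, pvLoopDir]
  | cons s rest ih =>
    intro seen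
    by_cases hd : (PySem.Dict.getD (PySem.Dict.mk s) "direction" "" == direction) = true
    · by_cases hb : (PySem.Dict.getD (PySem.Dict.mk s) "bar_time" "" == bar_time) = true
      · simp [pvAltLoop, pvLoopExact, hd, hb]
      · simp [pvAltLoop, pvLoopExact, pvLoopDir, hd, hb, ih]
    · simp [pvAltLoop, pvLoopExact, pvLoopDir, hd, ih]

theorem validate_backtest_parity_spec : Claim_equal_validate_backtest_parity := by
  intro direction bar_time backtest_signals _
  unfold Spec_validate_backtest_parity validate_backtest_parity validate_backtest_parity_alt
  by_cases h : backtest_signals = []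
  · simp [h]
  · simp [h, pvAltLoop_eq]
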